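-- pv_equiv track=rewrite | github.com/analyst-huang/analyst-huang.github.io | scripts/clean_math_code.py | replace_dollar_blocks
-- ===== SOURCE A (Python) =====
-- from typing import Iterable, Sequence, Tuple
--
-- def _line_ending(line: str) -> str:
--     if line.endswith("\r\n"):
--         return "\r\n"
--     if line.endswith("\n"):
--         return "\n"
--     if line.endswith("\r"):
--         return "\r"
--     return ""
--
-- def replace_dollar_blocks(text: str) -> Tuple[str, int]:
--     lines = text.splitlines(keepends=True)
--     out: list[str] = []
--     i = 0
--     count = 0
--
--     while i < len(lines):
--         line = lines[i]
--         if line.strip() == "$$":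
--             j = i + 1
--             while j < len(lines):
--                 if lines[j].strip() == "$$":
--                     opening_lb = _line_ending(line) or _line_ending(lines[j]) or "\n"
--                     closing_lb = _line_ending(lines[j])
--
--                     out.append("{{< math >}}" + opening_lb)
--                     out.append("$" + opening_lb)
--                     out.extend(lines[i + 1 : j])
--                     out.append("$" + opening_lb)
--                     out.append("{{< /math >}}" + closing_lb)
--
--                     count += 1
--                     i = j + 1
--                     break
--                 j += 1
--             else:
--                 out.append(line)
--                 i += 1
--             continue
--
--         out.append(line)
--         i += 1
--
--     return "".join(out), count
-- ===== SOURCE B (Python) =====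
-- def _line_ending(line: str) -> str:
--     if line.endswith("\r\n"):
--         return "\r\n"
--     if line.endswith("\n"):
--         return "\n"
--     if line.endswith("\r"):
--         return "\r"
--     return ""
--
-- def replace_dollar_blocks(text):
--     lines = text.splitlines(keepends=True)
--     out = []
--     in_block = False
--     opening_line = ""
--     buffer = []
--     count = 0
--     for line in lines:
--         if in_block:
--             if line.strip() == "$$":
--                 opening_lb = _line_ending(opening_line) or _line_ending(line) or "\n"
--                 closing_lb = _line_ending(line)
--                 out.append("{{< math >}}" + opening_lb)
--                 out.append("$" + opening_lb)
--                 out.extend(buffer)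
--                 out.append("$" + opening_lb)
--                 out.append("{{< /math >}}" + closing_lb)
--                 buffer = []
--                 count += 1
--                 in_block = False
--             else:
--                 buffer.append(line)
--         elif line.strip() == "$$":
--             in_block = True
--             opening_line = line
--             buffer = []
--         else:
--             out.append(line)
--     if in_block:
--         out.append(opening_line)
--         out.extend(buffer)
--     return "".join(out), count
-- ===== Notes on version B (the rewrite author's own statement) =====
-- stated objective: alternative
-- what changed: Replaced A's index-based outer loop with an inner look-ahead scan for the closing $$ (and re-slicing lines[i+1:j]) by a single flat state-machine pass with an in_block flag, a stored opening line and a content buffer, flushed verbatim if the block is never closed.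
import Mathlib
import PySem

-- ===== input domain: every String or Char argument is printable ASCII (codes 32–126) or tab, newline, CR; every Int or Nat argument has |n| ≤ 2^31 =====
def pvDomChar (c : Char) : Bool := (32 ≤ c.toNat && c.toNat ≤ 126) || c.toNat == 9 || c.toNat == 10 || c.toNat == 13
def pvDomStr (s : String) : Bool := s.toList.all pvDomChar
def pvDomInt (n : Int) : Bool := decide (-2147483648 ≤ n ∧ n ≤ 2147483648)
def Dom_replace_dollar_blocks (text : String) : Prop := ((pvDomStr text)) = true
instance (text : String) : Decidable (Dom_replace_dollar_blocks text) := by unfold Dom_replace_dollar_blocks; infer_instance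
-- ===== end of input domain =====

-- B replaces A's index/look-ahead scan (inner while searching for the closing "$$") by a single
-- state-machine pass with an in_block flag and a buffer (objective: alternative decomposition, same cost).

-- text.splitlines(keepends=True), exact on the Dom alphabet (line breaks there are "\n", "\r", "\r\n")
def pvSplitKeep : List Char → List Char → List (List Char)
  | acc, [] => if acc = [] then [] else [acc.reverse]
  | acc, '\r' :: '\n' :: rest => (acc.reverse ++ ['\r', '\n']) :: pvSplitKeep [] rest
  | acc, '\r' :: rest => (acc.reverse ++ ['\r']) :: pvSplitKeep [] rest
  | acc, '\n' :: rest => (acc.reverse ++ ['\n']) :: pvSplitKeep [] rest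
  | acc, c :: rest => pvSplitKeep (c :: acc) rest

-- _line_ending (shared module helper)
def pvLineEnding (line : List Char) : List Char :=
  if PySem.Chars.endswith line ['\r', '\n'] then ['\r', '\n']
  else if PySem.Chars.endswith line ['\n'] then ['\n']
  else if PySem.Chars.endswith line ['\r'] then ['\r']
  else []

-- Python's `x or y` on strings
def pvOr (a b : List Char) : List Char := if a = [] then b else a

-- ===== PORT A =====
-- the inner `while j < len(lines)` scan: first line stripping to "$$", with the lines before it
-- (lines[i+1:j]) and the lines after it (lines[j+1:])
def pvFindClose : List (List Char) → Option (List (List Char) × List Char × List (List Char))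
  | [] => none
  | l :: r =>
    if PySem.Chars.strip l = ['$', '$'] then some ([], l, r)
    else match pvFindClose r with
      | none => none
      | some (m, cl, r') => some (l :: m, cl, r')

theorem pvFindClose_lt (r : List (List Char)) (m : List (List Char)) (cl : List Char)
    (r' : List (List Char)) (h : pvFindClose r = some (m, cl, r')) : r'.length < r.length := by
  induction r generalizing m cl r' with
  | nil => simp [pvFindClose] at h
  | cons l t ih =>
    simp only [pvFindClose] at h
    split at h
    · cases h
      simp
    · cases hf : pvFindClose t with
      | none => rw [hf] at h; cases h
      | some v =>
        obtain ⟨m0, cl0, r0⟩ := v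
        rw [hf] at h
        simp only [Option.some.injEq, Prod.mk.injEq] at h
        obtain ⟨-, -, h3⟩ := h
        have := ih m0 cl0 r0 hf
        simp [← h3]
        omega

-- the outer `while i < len(lines)` loop of A (i advancing = dropping processed lines)
def pvALoop : List (List Char) → List (List Char) × Int
  | [] => ([], 0)
  | l :: rest =>
    if PySem.Chars.strip l = ['$', '$'] then
      match h : pvFindClose rest with
      | some (mid, cl, rest') =>
        let olb := pvOr (pvOr (pvLineEnding l) (pvLineEnding cl)) ['\n']
        let clb := pvLineEnding cl
        let p := pvALoop rest'
        (("{{< math >}}".toList ++ olb) :: ('$' :: olb) :: (mid ++ ('$' :: olb) ::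
          ("{{< /math >}}".toList ++ clb) :: p.1), p.2 + 1)
      | none =>
        let p := pvALoop rest
        (l :: p.1, p.2)
    else
      let p := pvALoop rest
      (l :: p.1, p.2)
termination_by ls => ls.length
decreasing_by
  · exact Nat.lt_succ_of_lt (pvFindClose_lt _ _ _ _ h)
  · simp
  · simp

def replace_dollar_blocks (text : String) : String × Int :=
  let lines := pvSplitKeep [] text.toList
  let p := pvALoop lines
  (String.ofList p.1.flatten, p.2)   -- "".join(out)

-- ===== PORT B =====
-- state of Source B's single pass: (out, in_block, opening_line, buffer, count)
def pvBStep : (List (List Char) × Bool × List Char × List (List Char) × Int) → List Char →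
    (List (List Char) × Bool × List Char × List (List Char) × Int)
  | (out, inb, opening, buffer, count), line =>
    if inb then
      if PySem.Chars.strip line = ['$', '$'] then
        let olb := pvOr (pvOr (pvLineEnding opening) (pvLineEnding line)) ['\n']
        let clb := pvLineEnding line
        (out ++ [("{{< math >}}".toList ++ olb), ('$' :: olb)] ++ buffer ++
          [('$' :: olb), ("{{< /math >}}".toList ++ clb)], false, opening, [], count + 1)
      else (out, true, opening, buffer ++ [line], count)
    else
      if PySem.Chars.strip line = ['$', '$'] then (out, true, line, [], count)
      else (out ++ [line], false, opening, buffer, count)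

def replace_dollar_blocks_alt (text : String) : String × Int :=
  let lines := pvSplitKeep [] text.toList
  let s := lines.foldl pvBStep ([], false, [], [], 0)
  match s with
  | (out, inb, opening, buffer, count) =>
    let out' := if inb then out ++ opening :: buffer else out
    (String.ofList out'.flatten, count)   -- "".join(out)

-- ===== PRECONDITION & SPEC =====
def Spec_replace_dollar_blocks (text : String) (out : String × Int) : Prop := out = replace_dollar_blocks_alt text
instance (text : String) (out : String × Int) : Decidable (Spec_replace_dollar_blocks text out) := by unfold Spec_replace_dollar_blocks; infer_instance

-- ===== CLAIM (what is proved, stated in full; the proofs are below) =====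
def Claim_equal_replace_dollar_blocks : Prop := ∀ (text : String), Dom_replace_dollar_blocks text → Spec_replace_dollar_blocks text (replace_dollar_blocks text)

-- ===== LEMMAS AND PROOFS =====

-- B's flush after the loop, as a function of the final state
def pvFinalize : (List (List Char) × Bool × List Char × List (List Char) × Int) →
    (List (List Char) × Int)
  | (out, inb, opening, buffer, count) => (if inb then out ++ opening :: buffer else out, count)

theorem pvALoop_cons_not (l : List Char) (rest : List (List Char))
    (hs : ¬ PySem.Chars.strip l = ['$', '$']) :
    pvALoop (l :: rest) = (l :: (pvALoop rest).1, (pvALoop rest).2) := by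
  rw [pvALoop.eq_def]
  simp [hs]

theorem pvALoop_cons_none (l : List Char) (rest : List (List Char))
    (hs : PySem.Chars.strip l = ['$', '$']) (hf : pvFindClose rest = none) :
    pvALoop (l :: rest) = (l :: (pvALoop rest).1, (pvALoop rest).2) := by
  rw [pvALoop.eq_def]
  simp only [hs, if_pos]
  split
  · rename_i heq; rw [hf] at heq; cases heq
  · rfl

theorem pvALoop_cons_some (l : List Char) (rest mid : List (List Char)) (cl : List Char)
    (rest' : List (List Char)) (hs : PySem.Chars.strip l = ['$', '$'])
    (hf : pvFindClose rest = some (mid, cl, rest')) :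
    pvALoop (l :: rest) =
      (("{{< math >}}".toList ++ pvOr (pvOr (pvLineEnding l) (pvLineEnding cl)) ['\n']) ::
        ('$' :: pvOr (pvOr (pvLineEnding l) (pvLineEnding cl)) ['\n']) :: (mid ++
        ('$' :: pvOr (pvOr (pvLineEnding l) (pvLineEnding cl)) ['\n']) ::
        ("{{< /math >}}".toList ++ pvLineEnding cl) :: (pvALoop rest').1),
       (pvALoop rest').2 + 1) := by
  rw [pvALoop.eq_def]
  simp only [hs, if_pos]
  split
  · rename_i m0 c0 r0 heq
    rw [hf] at heq
    cases heq
    rfl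
  · rename_i heq; rw [hf] at heq; cases heq

theorem pvALoop_of_findClose_none (rest : List (List Char)) (h : pvFindClose rest = none) :
    pvALoop rest = (rest, 0) := by
  induction rest with
  | nil => rw [pvALoop]
  | cons l r ih =>
    by_cases hs : PySem.Chars.strip l = ['$', '$']
    · simp [pvFindClose, hs] at h
    · simp only [pvFindClose, if_neg hs] at h
      cases hf : pvFindClose r with
      | none => rw [pvALoop_cons_not l r hs, ih hf]
      | some v => obtain ⟨m, c, r'⟩ := v; rw [hf] at h; cases h

-- folding B's step while in_block: buffer the prefix up to the first "$$", then emit the block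
theorem pvInBlock (rest : List (List Char)) (out : List (List Char)) (op : List Char)
    (buf : List (List Char)) (c : Int) :
    rest.foldl pvBStep (out, true, op, buf, c) =
      match pvFindClose rest with
      | none => (out, true, op, buf ++ rest, c)
      | some (mid, cl, rest') =>
        rest'.foldl pvBStep
          (out ++ [("{{< math >}}".toList ++ pvOr (pvOr (pvLineEnding op) (pvLineEnding cl)) ['\n']),
                   ('$' :: pvOr (pvOr (pvLineEnding op) (pvLineEnding cl)) ['\n'])] ++ (buf ++ mid) ++
                  [('$' :: pvOr (pvOr (pvLineEnding op) (pvLineEnding cl)) ['\n']),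
                   ("{{< /math >}}".toList ++ pvLineEnding cl)],
           false, op, [], c + 1) := by
  induction rest generalizing buf with
  | nil => simp [pvFindClose]
  | cons l r ih =>
    by_cases hs : PySem.Chars.strip l = ['$', '$']
    · simp [pvFindClose, hs, List.foldl_cons, pvBStep]
    · simp only [pvFindClose, if_neg hs, List.foldl_cons, pvBStep, reduceIte]
      rw [ih (buf ++ [l])]
      cases hf : pvFindClose r with
      | none => simp
      | some v => obtain ⟨m, cl, r'⟩ := v; simp

-- main invariant: from any not-in-block state, B's remaining fold + flush equals A's loop output
theorem pvMain (n : Nat) (lines : List (List Char)) (hn : lines.length ≤ n)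
    (out : List (List Char)) (op : List Char) (buf : List (List Char)) (c : Int) :
    pvFinalize (lines.foldl pvBStep (out, false, op, buf, c)) =
      (out ++ (pvALoop lines).1, c + (pvALoop lines).2) := by
  induction n generalizing lines out op buf c with
  | zero =>
    have : lines = [] := List.length_eq_zero_iff.mp (Nat.le_zero.mp hn)
    subst this
    rw [pvALoop]
    simp [pvFinalize]
  | succ n ih =>
    cases lines with
    | nil => rw [pvALoop]; simp [pvFinalize]
    | cons l rest =>
      have hr : rest.length ≤ n := by simp at hn; omega
      by_cases hs : PySem.Chars.strip l = ['$', '$']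
      · rw [List.foldl_cons]
        simp only [pvBStep, hs, if_pos]
        simp only [Bool.false_eq_true, reduceIte]
        rw [pvInBlock]
        cases hf : pvFindClose rest with
        | none =>
          simp only [pvFinalize]
          rw [pvALoop_cons_none l rest hs hf, pvALoop_of_findClose_none rest hf]
          simp
        | some v =>
          obtain ⟨mid, cl, rest'⟩ := v
          have hr' : rest'.length ≤ n := by
            have := pvFindClose_lt rest mid cl rest' hf; omega
          rw [ih rest' hr']
          rw [pvALoop_cons_some l rest mid cl rest' hs hf]
          refine Prod.ext ?_ ?_
          · simp
          · simp; omega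
      · rw [List.foldl_cons]
        simp only [pvBStep, hs]
        simp only [Bool.false_eq_true, reduceIte]
        rw [ih rest hr]
        rw [pvALoop_cons_not l rest hs]
        simp

-- ===== VERDICT (by name: the statement is the Claim_ definition above) =====
theorem replace_dollar_blocks_spec : Claim_equal_replace_dollar_blocks := by
  intro text _
  unfold Spec_replace_dollar_blocks replace_dollar_blocks replace_dollar_blocks_alt
  have h := pvMain (pvSplitKeep [] text.toList).length (pvSplitKeep [] text.toList) le_rfl
    [] [] [] 0
  rcases hEq : (pvSplitKeep [] text.toList).foldl pvBStep ([], false, [], [], 0) with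
    ⟨o, inb, op, buf, cnt⟩
  rw [hEq] at h
  simp only [pvFinalize, List.nil_append] at h
  have h1 : (if inb = true then o ++ op :: buf else o) = (pvALoop (pvSplitKeep [] text.toList)).1 :=
    congrArg Prod.fst h
  have h2 : cnt = 0 + (pvALoop (pvSplitKeep [] text.toList)).2 := congrArg Prod.snd h
  simp only []
  rw [hEq]
  simp only [← h1]
  rw [h2]
  simp
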